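-- pv_equiv track=rewrite | github.com/Rusklass/primer_design_app | app.py | _has_forbidden_complementarity
-- ===== SOURCE A (Python) =====
-- def reverse_complement(seq):
--     comp = {'A':'T', 'T':'A', 'G':'C', 'C':'G'}
--     return ''.join(comp.get(b, b) for b in seq[::-1])
--
-- def _has_forbidden_complementarity(loop: str, stem: str, min_k: int = 5) -> bool:
--     """
--     Return True if the loop contains reverse-complement matches of length >= min_k
--     to either stem arm, or if the loop is self-complementary over >= min_k.
--     """
--     left_arm  = stem
--     right_arm = reverse_complement(stem)  # the other arm sequence
--
--     # Check loop vs BOTH stem arms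
--     for arm in (left_arm, right_arm):
--         for k in range(min_k, min(len(loop), len(arm)) + 1):
--             # scan all k-mers of the arm; if rc(kmer) appears in loop -> forbidden
--             for i in range(len(arm) - k + 1):
--                 kmer = arm[i:i+k]
--                 if reverse_complement(kmer) in loop:
--                     return True
--
--     # Check loop self-complementarity (avoid internal mini-hairpins)
--     for k in range(min_k, len(loop) + 1):
--         for i in range(len(loop) - k + 1):
--             kmer = loop[i:i+k]
--             rc_kmer = reverse_complement(kmer)
--             # ensure we’re not trivial same-position match; any occurrence is suspicious
--             if rc_kmer in loop:
--                 # optionally, require a *separate* location: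
--                 j = loop.find(rc_kmer)
--                 if j != -1 and not (j == i and rc_kmer == kmer[::-1]):  # allow exact palindromic overlap only if you want
--                     return True
--     return False
-- ===== SOURCE B (Python) =====
-- def reverse_complement(seq):
--     comp = str.maketrans('ATGC', 'TACG')
--     return seq.translate(comp)[::-1]
--
-- def _has_forbidden_complementarity(loop: str, stem: str, min_k: int = 5) -> bool:
--     """
--     Same predicate, restructured:
--     - Arm check only needs k == min_k windows: any longer reverse-complement
--       match contains a min_k one. Checking a stem window w against BOTH arms
--       collapses to 'w in rc(loop) or w in loop', so rc is computed once.
--     - Self check keeps the k sweep but uses a single find() per window and a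
--       character test instead of rebuilding reversed strings for the exemption.
--     """
--     k = min_k
--     if k <= min(len(loop), len(stem)):
--         rc_loop = reverse_complement(loop)
--         for i in range(len(stem) - k + 1):
--             w = stem[i:i+k]
--             if w in loop or w in rc_loop:
--                 return True
--     n = len(loop)
--     for k in range(min_k, n + 1):
--         for i in range(n - k + 1):
--             w = loop[i:i+k]
--             j = loop.find(reverse_complement(w))
--             if j >= 0 and not (j == i and all(c not in 'ATGC' for c in w)):
--                 return True
--     return False
-- ===== Notes on version B (the rewrite author's own statement) =====
-- stated objective: faster
-- what changed: The stem-arm scan now checks only k = min_k windows (a longer reverse-complement match always contains a min_k one) against loop and a once-precomputed rc(loop), collapsing A's two-arm triple loop over all window lengths into one single-length pass; the self-complementarity scan keeps its k sweep but does one find() per window plus a character-class test instead of A's 'in'-scan, second find(), and rebuilt reversed strings.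
import Mathlib
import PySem

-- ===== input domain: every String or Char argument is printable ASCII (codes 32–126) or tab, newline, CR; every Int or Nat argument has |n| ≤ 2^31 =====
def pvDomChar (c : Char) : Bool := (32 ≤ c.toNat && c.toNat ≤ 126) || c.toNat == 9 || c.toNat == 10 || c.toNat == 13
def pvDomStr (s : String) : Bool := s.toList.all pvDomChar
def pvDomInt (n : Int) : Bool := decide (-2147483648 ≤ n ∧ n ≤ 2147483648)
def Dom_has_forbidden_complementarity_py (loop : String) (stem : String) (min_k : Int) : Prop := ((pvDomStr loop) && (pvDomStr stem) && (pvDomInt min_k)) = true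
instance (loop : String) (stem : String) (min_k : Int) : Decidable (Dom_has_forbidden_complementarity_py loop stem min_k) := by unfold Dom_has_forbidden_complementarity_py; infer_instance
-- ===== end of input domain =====

-- B restructures A: the stem-arm scan checks only k = min_k windows against a once-computed
-- rc(loop) (a longer reverse-complement match always contains a min_k one), and the loop
-- self-scan uses one find() per window with a character test instead of rebuilding reversed
-- strings; objective: alternative (partly faster arm phase).

-- ===== PORT A =====
-- 'for v in range(a, b): if f(v): return True' — the loop ported as an early-exit recursion
def pvLoop (f : Int → Bool) (i stop : Int) : Bool :=
  if _h : i < stop then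
    (if f i then true else pvLoop f (i+1) stop)
  else false
termination_by (stop - i).toNat
decreasing_by omega

-- comp = {'A':'T', 'T':'A', 'G':'C', 'C':'G'}
def pvComp : PySem.Dict Char Char := PySem.Dict.ofList [('A','T'),('T','A'),('G','C'),('C','G')]

-- ''.join(comp.get(b, b) for b in seq[::-1])  (join of 1-char strings written as String.ofList of the char list)
def reverse_complement_py (seq : String) : String :=
  String.ofList ((((PySem.Str.slice? seq none none (-1)).getD "").toList).map (fun b => PySem.Dict.getD pvComp b b))

def has_forbidden_complementarity_py (loop : String) (stem : String) (min_k : Int) : Bool :=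
  let left_arm := stem
  let right_arm := reverse_complement_py stem
  -- for arm in (left_arm, right_arm): for k …: for i …: if rc(kmer) in loop: return True
  (([left_arm, right_arm]).any (fun arm =>
    pvLoop (fun k =>
      pvLoop (fun i =>
        PySem.Str.isIn (reverse_complement_py (PySem.Str.slice arm (some i) (some (i+k)))) loop)
        0 (PySem.Str.len arm - k + 1))
      min_k (min (PySem.Str.len loop) (PySem.Str.len arm) + 1)))
  ||
  -- for k …: for i …: kmer = loop[i:i+k]; rc_kmer = rc(kmer); if rc_kmer in loop: j = loop.find(rc_kmer); …
  (pvLoop (fun k =>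
    pvLoop (fun i =>
      let kmer := PySem.Str.slice loop (some i) (some (i+k))
      let rc_kmer := reverse_complement_py kmer
      if PySem.Str.isIn rc_kmer loop then
        let j := PySem.Str.find loop rc_kmer
        (!(j == (-1 : Int))) && (!((j == i) && (rc_kmer == (PySem.Str.slice? kmer none none (-1)).getD "")))
      else false)
      0 (PySem.Str.len loop - k + 1))
    min_k (PySem.Str.len loop + 1))

-- ===== PORT B =====
-- str.maketrans('ATGC','TACG') / str.translate ported by hand as a per-character table (exact: the table maps single ASCII chars)
def pvCompChar (c : Char) : Char :=
  if c = 'A' then 'T' else if c = 'T' then 'A' else if c = 'G' then 'C' else if c = 'C' then 'G' else c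

-- seq.translate(comp)[::-1]
def reverse_complement_alt (seq : String) : String :=
  String.ofList ((seq.toList.map pvCompChar).reverse)

def has_forbidden_complementarity_py_alt (loop : String) (stem : String) (min_k : Int) : Bool :=
  let k := min_k
  let arm : Bool :=
    if k ≤ min (PySem.Str.len loop) (PySem.Str.len stem) then
      let rc_loop := reverse_complement_alt loop
      pvLoop (fun i =>
        let w := PySem.Str.slice stem (some i) (some (i+k))
        PySem.Str.isIn w loop || PySem.Str.isIn w rc_loop)
        0 (PySem.Str.len stem - k + 1)
    else false
  let n := PySem.Str.len loop
  arm ||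
  (pvLoop (fun k =>
    pvLoop (fun i =>
      let w := PySem.Str.slice loop (some i) (some (i+k))
      let j := PySem.Str.find loop (reverse_complement_alt w)
      decide (0 ≤ j) && (!((j == i) && (w.toList.all (fun c => !(PySem.Str.isIn (String.ofList [c]) "ATGC"))))))
      0 (n - k + 1))
    min_k (n + 1))

-- ===== PRECONDITION & SPEC =====
def Spec_has_forbidden_complementarity_py (loop : String) (stem : String) (min_k : Int) (out : Bool) : Prop := out = has_forbidden_complementarity_py_alt loop stem min_k
instance (loop : String) (stem : String) (min_k : Int) (out : Bool) : Decidable (Spec_has_forbidden_complementarity_py loop stem min_k out) := by unfold Spec_has_forbidden_complementarity_py; infer_instance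

-- ===== CLAIM (what is proved, stated in full; the proofs are below) =====
def Claim_equal_has_forbidden_complementarity_py : Prop := ∀ (loop : String) (stem : String) (min_k : Int), Dom_has_forbidden_complementarity_py loop stem min_k → Spec_has_forbidden_complementarity_py loop stem min_k (has_forbidden_complementarity_py loop stem min_k)


-- ===== LEMMAS AND PROOFS =====

theorem pvLoop_eq_any (f : Int → Bool) (i stop : Int) :
    pvLoop f i stop = (PySem.List.pyRange i stop 1).any f := by
  fun_induction pvLoop f i stop with
  | case1 x h hf =>
    rw [PySem.List.pyRange_one_cons h, List.any_cons, hf, Bool.true_or]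
  | case2 x h hf ih =>
    rw [ih, PySem.List.pyRange_one_cons h, List.any_cons]
    rw [Bool.not_eq_true] at hf
    rw [hf, Bool.false_or]
  | case3 x h =>
    rw [PySem.List.pyRange_one_eq_nil (by omega), List.any_nil]

-- the reverse complement, at the list-of-chars level
def rcL (l : List Char) : List Char := (l.map pvCompChar).reverse

theorem comp_getD (c : Char) : PySem.Dict.getD pvComp c c = pvCompChar c := by
  have hpc : pvComp.items = [('A','T'),('T','A'),('G','C'),('C','G')] := by decide
  by_cases h1 : c = 'A'
  · subst h1; decide
  by_cases h2 : c = 'T'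
  · subst h2; decide
  by_cases h3 : c = 'G'
  · subst h3; decide
  by_cases h4 : c = 'C'
  · subst h4; decide
  have e1 : ('A' == c) = false := by simp [Ne.symm h1]
  have e2 : ('T' == c) = false := by simp [Ne.symm h2]
  have e3 : ('G' == c) = false := by simp [Ne.symm h3]
  have e4 : ('C' == c) = false := by simp [Ne.symm h4]
  simp [PySem.Dict.getD, PySem.Dict.get?, hpc, List.find?, e1, e2, e3, e4, pvCompChar, h1, h2, h3, h4]

theorem pvCompChar_invol (c : Char) : pvCompChar (pvCompChar c) = c := by
  by_cases h1 : c = 'A' <;> by_cases h2 : c = 'T' <;> by_cases h3 : c = 'G' <;> by_cases h4 : c = 'C' <;>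
    simp_all [pvCompChar]

theorem rc_py_toList (s : String) : (reverse_complement_py s).toList = rcL s.toList := by
  unfold reverse_complement_py rcL
  rw [PySem.Str.slice?_none_none_neg_one]
  simp [comp_getD, List.map_reverse]

theorem rc_alt_eq (s : String) : reverse_complement_alt s = reverse_complement_py s := by
  unfold reverse_complement_alt reverse_complement_py
  rw [PySem.Str.slice?_none_none_neg_one]
  simp [comp_getD, List.map_reverse]

theorem rcL_length (l : List Char) : (rcL l).length = l.length := by
  simp [rcL]

theorem rcL_rcL (l : List Char) : rcL (rcL l) = l := by
  simp [rcL, List.map_reverse, List.map_map, Function.comp_def, pvCompChar_invol]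

theorem rcL_infix {u l : List Char} (h : u <:+: l) : rcL u <:+: rcL l := by
  exact List.reverse_infix.mpr (h.map _)

theorem infix_rcL_iff {u l : List Char} : u <:+: rcL l ↔ rcL u <:+: l := by
  constructor
  · intro h; have := rcL_infix h; rwa [rcL_rcL] at this
  · intro h; have := rcL_infix h; rwa [rcL_rcL] at this


theorem map_fix_iff (f : Char → Char) (l : List Char) : List.map f l = l ↔ ∀ c ∈ l, f c = c := by
  induction l with
  | nil => simp
  | cons x xs ih => simp [ih]

theorem compChar_fixed_iff (c : Char) : pvCompChar c = c ↔ c ∉ (['A','T','G','C'] : List Char) := by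
  by_cases h1 : c = 'A'
  · subst h1; simp [pvCompChar]
  by_cases h2 : c = 'T'
  · subst h2; simp [pvCompChar]
  by_cases h3 : c = 'G'
  · subst h3; simp [pvCompChar]
  by_cases h4 : c = 'C'
  · subst h4; simp [pvCompChar]
  simp [pvCompChar, h1, h2, h3, h4]

theorem rcL_eq_reverse_iff (l : List Char) :
    rcL l = l.reverse ↔ ∀ c ∈ l, c ∉ (['A','T','G','C'] : List Char) := by
  unfold rcL
  rw [List.reverse_inj, map_fix_iff]
  constructor
  · intro h c hc; exact (compChar_fixed_iff c).mp (h c hc)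
  · intro h c hc; exact (compChar_fixed_iff c).mpr (h c hc)

-- windows of positive length k are exactly the length-k infixes
theorem window_any (s : List Char) (C : List Char → Bool) (k : Int) (hk : 1 ≤ k) :
    ((PySem.List.pyRange 0 ((s.length : Int) - k + 1) 1).any
      (fun i => C (PySem.List.slice s (some i) (some (i + k)))) = true)
    ↔ ∃ u, u <:+: s ∧ (u.length : Int) = k ∧ C u = true := by
  rw [List.any_eq_true]
  constructor
  · rintro ⟨i, hi, hC⟩
    rw [PySem.List.mem_pyRange_one] at hi
    obtain ⟨hi0, hilt⟩ := hi
    have h0k : (0:Int) ≤ i + k := by omega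
    rw [PySem.List.slice_toNat s hi0 h0k] at hC
    refine ⟨_, ((List.take_prefix _ _).isInfix).trans ((List.drop_suffix _ _).isInfix), ?_, hC⟩
    simp only [List.length_take, List.length_drop]
    omega
  · rintro ⟨u, hinf, hlen, hC⟩
    obtain ⟨pre, suf, rfl⟩ := hinf
    refine ⟨(pre.length : Int), ?_, ?_⟩
    · rw [PySem.List.mem_pyRange_one]
      refine ⟨Int.natCast_nonneg _, ?_⟩
      simp only [List.length_append]
      push_cast
      omega
    · have hsl : PySem.List.slice (pre ++ u ++ suf) (some (pre.length:Int))
          (some ((pre.length:Int) + k)) = u := by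
        rw [← hlen, PySem.List.slice_natCast_add]
        rw [List.append_assoc, List.drop_left, List.take_left]
      rw [hsl]; exact hC

-- length-k hits of the stem against the two arm conditions
def HitRC (L S : List Char) (k : Int) : Prop := ∃ u, u <:+: S ∧ (u.length : Int) = k ∧ rcL u <:+: L
def HitID (L S : List Char) (k : Int) : Prop := ∃ u, u <:+: S ∧ (u.length : Int) = k ∧ u <:+: L

theorem hit_flip (L S : List Char) (k : Int) : HitRC L (rcL S) k ↔ HitID L S k := by
  constructor
  · rintro ⟨u, hu, hl, hrc⟩
    refine ⟨rcL u, ?_, by rw [rcL_length]; exact hl, hrc⟩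
    have := rcL_infix hu; rwa [rcL_rcL] at this
  · rintro ⟨v, hv, hl, hL⟩
    refine ⟨rcL v, rcL_infix hv, by rw [rcL_length]; exact hl, by rwa [rcL_rcL]⟩

theorem hitRC_mono {L S : List Char} {m k : Int} (h1 : 0 ≤ m) (hmk : m ≤ k)
    (h : HitRC L S k) : HitRC L S m := by
  obtain ⟨u, hu, hl, hrc⟩ := h
  refine ⟨u.take m.toNat, (List.take_prefix _ _).isInfix.trans hu, ?_, ?_⟩
  · simp only [List.length_take]; omega
  · exact (rcL_infix (List.take_prefix _ _).isInfix).trans hrc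

theorem hitID_mono {L S : List Char} {m k : Int} (h1 : 0 ≤ m) (hmk : m ≤ k)
    (h : HitID L S k) : HitID L S m := by
  obtain ⟨u, hu, hl, hL⟩ := h
  refine ⟨u.take m.toNat, (List.take_prefix _ _).isInfix.trans hu, ?_, ?_⟩
  · simp only [List.length_take]; omega
  · exact (List.take_prefix _ _).isInfix.trans hL

-- A's scan of one arm, characterised (positive min_k)
theorem bigA_iff (loop arm : String) (m : Int) (hm : 1 ≤ m) :
    ((PySem.List.pyRange m (min (PySem.Str.len loop) (PySem.Str.len arm) + 1) 1).any (fun k =>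
      (PySem.List.pyRange 0 (PySem.Str.len arm - k + 1) 1).any (fun i =>
        PySem.Str.isIn (reverse_complement_py (PySem.Str.slice arm (some i) (some (i+k)))) loop)) = true)
    ↔ ∃ k, m ≤ k ∧ k ≤ min (loop.toList.length : Int) (arm.toList.length : Int) ∧
        HitRC loop.toList arm.toList k := by
  rw [List.any_eq_true]
  constructor
  · rintro ⟨k, hk, hany⟩
    rw [PySem.List.mem_pyRange_one, PySem.Str.len_eq, PySem.Str.len_eq] at hk
    refine ⟨k, hk.1, by omega, ?_⟩
    rw [show (PySem.Str.len arm - k + 1) = ((arm.toList.length : Int) - k + 1) by rw [PySem.Str.len_eq]] at hany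
    simp only [PySem.Str.isIn_eq, rc_py_toList, PySem.Str.toList_slice,
      PySem.Chars.slice_eq_listSlice] at hany
    rw [window_any arm.toList (fun u => PySem.Chars.isIn (rcL u) loop.toList) k (by omega)] at hany
    obtain ⟨u, hu, hl, hin⟩ := hany
    exact ⟨u, hu, hl, (PySem.Chars.isIn_iff_infix _ _).mp hin⟩
  · rintro ⟨k, hmk, hkmin, u, hu, hl, hrc⟩
    refine ⟨k, ?_, ?_⟩
    · rw [PySem.List.mem_pyRange_one, PySem.Str.len_eq, PySem.Str.len_eq]; omega
    · rw [show (PySem.Str.len arm - k + 1) = ((arm.toList.length : Int) - k + 1) by rw [PySem.Str.len_eq]]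
      simp only [PySem.Str.isIn_eq, rc_py_toList, PySem.Str.toList_slice,
        PySem.Chars.slice_eq_listSlice]
      rw [window_any arm.toList (fun u => PySem.Chars.isIn (rcL u) loop.toList) k (by omega)]
      exact ⟨u, hu, hl, (PySem.Chars.isIn_iff_infix _ _).mpr hrc⟩

-- the two self-scan loop bodies agree cell by cell
theorem cell_eq (loop : String) (k i : Int) :
    (if PySem.Str.isIn (reverse_complement_py (PySem.Str.slice loop (some i) (some (i+k)))) loop then
       (!((PySem.Str.find loop (reverse_complement_py (PySem.Str.slice loop (some i) (some (i+k))))) == (-1 : Int))) &&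
       (!(((PySem.Str.find loop (reverse_complement_py (PySem.Str.slice loop (some i) (some (i+k))))) == i) &&
          ((reverse_complement_py (PySem.Str.slice loop (some i) (some (i+k)))) ==
            (PySem.Str.slice? (PySem.Str.slice loop (some i) (some (i+k))) none none (-1)).getD "")))
     else false)
    = (decide (0 ≤ PySem.Str.find loop (reverse_complement_alt (PySem.Str.slice loop (some i) (some (i+k))))) &&
       (!(((PySem.Str.find loop (reverse_complement_alt (PySem.Str.slice loop (some i) (some (i+k))))) == i) &&
          ((PySem.Str.slice loop (some i) (some (i+k))).toList.all
            (fun c => !(PySem.Str.isIn (String.ofList [c]) "ATGC")))))) := by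
  rw [rc_alt_eq]
  set w := PySem.Str.slice loop (some i) (some (i+k)) with hw
  set r := reverse_complement_py w with hr
  set j := PySem.Str.find loop r with hj
  by_cases h : PySem.Str.isIn r loop = true
  · rw [if_pos h]
    have hinf : r.toList <:+: loop.toList := by
      rw [PySem.Str.isIn_eq] at h; exact (PySem.Chars.isIn_iff_infix _ _).mp h
    have hj0 : 0 ≤ j := by
      rw [hj, PySem.Str.find_eq]; exact (PySem.Chars.find_nonneg_iff _ _).mpr hinf
    have hj1 : (j == (-1:Int)) = false := by simp only [beq_eq_false_iff_ne, ne_eq]; omega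
    have hj2 : decide (0 ≤ j) = true := by simpa using hj0
    rw [hj1, hj2]
    simp only [Bool.not_false, Bool.true_and]
    suffices hX : (r == (PySem.Str.slice? w none none (-1)).getD "")
        = (w.toList.all (fun c => !(PySem.Str.isIn (String.ofList [c]) "ATGC"))) by rw [hX]
    rw [PySem.Str.slice?_none_none_neg_one]
    rw [Bool.eq_iff_iff]
    simp only [Option.getD_some, beq_iff_eq]
    constructor
    · intro heq
      have : r.toList = w.toList.reverse := by rw [heq, String.toList_ofList]
      rw [hr, rc_py_toList] at this
      rw [List.all_eq_true]
      intro c hc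
      have hfix := (rcL_eq_reverse_iff w.toList).mp this c hc
      simp only [PySem.Str.isIn_eq, String.toList_ofList, Bool.not_eq_true']
      rw [PySem.Chars.isIn_eq_false_iff, List.singleton_infix_iff]
      simpa using hfix
    · intro hall
      have : rcL w.toList = w.toList.reverse := by
        rw [rcL_eq_reverse_iff]
        intro c hc
        have := (List.all_eq_true.mp hall) c hc
        simp only [PySem.Str.isIn_eq, String.toList_ofList, Bool.not_eq_true'] at this
        rw [PySem.Chars.isIn_eq_false_iff, List.singleton_infix_iff] at this
        simpa using this
      have hlist : r.toList = (String.ofList w.toList.reverse).toList := by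
        rw [hr, rc_py_toList, String.toList_ofList]; exact this
      calc r = String.ofList r.toList := String.ofList_toList.symm
        _ = String.ofList (String.ofList w.toList.reverse).toList := by rw [hlist]
        _ = String.ofList w.toList.reverse := String.ofList_toList
  · rw [if_neg h]
    have hninf : ¬ (r.toList <:+: loop.toList) := by
      rw [Bool.not_eq_true] at h
      rw [PySem.Str.isIn_eq] at h
      exact (PySem.Chars.isIn_eq_false_iff _ _).mp h
    have hj0 : ¬ (0 ≤ j) := by
      rw [hj, PySem.Str.find_eq]
      intro hc; exact hninf ((PySem.Chars.find_nonneg_iff _ _).mp hc)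
    have : decide (0 ≤ j) = false := by simpa using hj0
    rw [this, Bool.false_and]


theorem rc_alt_toList (s : String) : (reverse_complement_alt s).toList = rcL s.toList := by
  rw [rc_alt_eq, rc_py_toList]

-- B's guarded arm scan, characterised (positive min_k)
theorem armB_iff (loop stem : String) (m : Int) (hm : 1 ≤ m) :
    ((if m ≤ min (PySem.Str.len loop) (PySem.Str.len stem) then
       (PySem.List.pyRange 0 (PySem.Str.len stem - m + 1) 1).any (fun i =>
         PySem.Str.isIn (PySem.Str.slice stem (some i) (some (i+m))) loop ||
         PySem.Str.isIn (PySem.Str.slice stem (some i) (some (i+m))) (reverse_complement_alt loop))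
     else false) = true)
    ↔ (m ≤ min (loop.toList.length : Int) (stem.toList.length : Int) ∧
       (HitID loop.toList stem.toList m ∨ HitRC loop.toList stem.toList m)) := by
  rw [PySem.Str.len_eq, PySem.Str.len_eq]
  split_ifs with hg
  · simp only [PySem.Str.isIn_eq, PySem.Str.toList_slice, PySem.Chars.slice_eq_listSlice,
      rc_alt_toList]
    rw [window_any stem.toList
      (fun u => PySem.Chars.isIn u loop.toList || PySem.Chars.isIn u (rcL loop.toList)) m hm]
    constructor
    · rintro ⟨u, hu, hl, hC⟩
      refine ⟨hg, ?_⟩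
      rw [Bool.or_eq_true] at hC
      rcases hC with h1 | h1
      · exact Or.inl ⟨u, hu, hl, (PySem.Chars.isIn_iff_infix _ _).mp h1⟩
      · exact Or.inr ⟨u, hu, hl, infix_rcL_iff.mp ((PySem.Chars.isIn_iff_infix _ _).mp h1)⟩
    · rintro ⟨_, h | h⟩
      · obtain ⟨u, hu, hl, hL⟩ := h
        refine ⟨u, hu, hl, ?_⟩
        rw [Bool.or_eq_true]
        exact Or.inl ((PySem.Chars.isIn_iff_infix _ _).mpr hL)
      · obtain ⟨u, hu, hl, hrc⟩ := h
        refine ⟨u, hu, hl, ?_⟩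
        rw [Bool.or_eq_true]
        exact Or.inr ((PySem.Chars.isIn_iff_infix _ _).mpr (infix_rcL_iff.mpr hrc))
  · simp only [false_iff]
    rintro ⟨hmin, -⟩
    exact hg hmin

theorem py_eq_alt (loop stem : String) (m : Int) :
    has_forbidden_complementarity_py loop stem m = has_forbidden_complementarity_py_alt loop stem m := by
  by_cases hm : 1 ≤ m
  · -- positive min_k: arm scans agree via the window characterisations, self scans cell by cell
    simp only [has_forbidden_complementarity_py, has_forbidden_complementarity_py_alt,
      pvLoop_eq_any]
    congr 1
    · -- arm part
      rw [Bool.eq_iff_iff, armB_iff loop stem m hm]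
      rw [List.any_cons, List.any_cons, List.any_nil]
      simp only [Bool.or_false]
      rw [Bool.or_eq_true]
      rw [bigA_iff loop stem m hm, bigA_iff loop (reverse_complement_py stem) m hm]
      constructor
      · rintro (⟨k, hmk, hkmin, h⟩ | ⟨k, hmk, hkmin, h⟩)
        · exact ⟨le_trans hmk hkmin, Or.inr (hitRC_mono (by omega) hmk h)⟩
        · rw [rc_py_toList] at h hkmin
          rw [rcL_length] at hkmin
          rw [hit_flip] at h
          exact ⟨le_trans hmk hkmin, Or.inl (hitID_mono (by omega) hmk h)⟩
      · rintro ⟨hmmin, h | h⟩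
        · refine Or.inr ⟨m, le_refl m, ?_, ?_⟩
          · rw [rc_py_toList, rcL_length]; exact hmmin
          · rw [rc_py_toList, hit_flip]; exact h
        · exact Or.inl ⟨m, le_refl m, hmmin, h⟩
    · -- self part
      exact congrArg _ (funext fun k => congrArg _ (funext fun i => cell_eq loop k i))
  · -- min_k ≤ 0: both sides hit an empty window and return True
    have hm' : m ≤ 0 := by omega
    have hempty : ∀ (s : String), (PySem.Str.slice s (some (-m)) (some (-m + m))).toList = [] := by
      intro s
      rw [show (-m + m) = (0:Int) by omega]
      rw [PySem.Str.toList_slice, PySem.Chars.slice_eq_listSlice,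
        PySem.List.slice_toNat _ (by omega) (le_refl 0)]
      simp
    have hA : has_forbidden_complementarity_py loop stem m = true := by
      simp only [has_forbidden_complementarity_py, pvLoop_eq_any]
      rw [Bool.or_eq_true]
      left
      rw [List.any_eq_true]
      refine ⟨stem, List.mem_cons_self, ?_⟩
      rw [List.any_eq_true]
      refine ⟨m, ?_, ?_⟩
      · rw [PySem.List.mem_pyRange_one, PySem.Str.len_eq, PySem.Str.len_eq]
        constructor
        · exact le_refl m
        · have h1 : (0:Int) ≤ (loop.toList.length : Int) := Int.natCast_nonneg _
          have h2 : (0:Int) ≤ (stem.toList.length : Int) := Int.natCast_nonneg _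
          omega
      · rw [List.any_eq_true]
        refine ⟨-m, ?_, ?_⟩
        · rw [PySem.List.mem_pyRange_one, PySem.Str.len_eq]
          have h2 : (0:Int) ≤ (stem.toList.length : Int) := Int.natCast_nonneg _
          omega
        · rw [PySem.Str.isIn_eq, rc_py_toList, hempty stem]
          simp [rcL, PySem.Chars.isIn_nil]
    have hB : has_forbidden_complementarity_py_alt loop stem m = true := by
      simp only [has_forbidden_complementarity_py_alt, pvLoop_eq_any]
      rw [Bool.or_eq_true]
      left
      rw [if_pos]
      · rw [List.any_eq_true]
        refine ⟨-m, ?_, ?_⟩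
        · rw [PySem.List.mem_pyRange_one, PySem.Str.len_eq]
          have h2 : (0:Int) ≤ (stem.toList.length : Int) := Int.natCast_nonneg _
          omega
        · rw [Bool.or_eq_true]
          left
          rw [PySem.Str.isIn_eq, hempty stem]
          exact PySem.Chars.isIn_nil _
      · rw [PySem.Str.len_eq, PySem.Str.len_eq]
        have h1 : (0:Int) ≤ (loop.toList.length : Int) := Int.natCast_nonneg _
        have h2 : (0:Int) ≤ (stem.toList.length : Int) := Int.natCast_nonneg _
        omega
    rw [hA, hB]

-- ===== VERDICT (by name: the statement is the Claim_ definition above) =====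
theorem has_forbidden_complementarity_py_spec : Claim_equal_has_forbidden_complementarity_py := by
  intro loop stem min_k _
  exact py_eq_alt loop stem min_k
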